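-- pv_equiv track=rewrite | github.com/Jake-Jake1122/command-center | assemble_brief.py | parse_current_ratings
-- ===== SOURCE A (Python) =====
-- def parse_current_ratings(raw_text):
--     ratings = {"colorado": {}, "utah": {}, "california": {}}
--     current_state = None
--     for line in raw_text.strip().split('\n'):
--         line = line.strip()
--         if not line:
--             continue
--         if line.endswith(':'):
--             state_name = line[:-1].lower()
--             if state_name in ratings:
--                 current_state = state_name
--         elif current_state and ':' in line:
--             zone, rating = line.split(':', 1)
--             key = zone.strip().lower().replace(' & ', '-').replace(' ', '-')
--             ratings[current_state][key] = rating.strip()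
--     return ratings
-- ===== SOURCE B (Python) =====
-- def parse_current_ratings(raw_text):
--     states = ("colorado", "utah", "california")
--     lines = [l.strip() for l in raw_text.strip().split('\n')]
--     # scan once: owner[i] = the recognized state section line i belongs to (or None)
--     owner = []
--     cur = None
--     for l in lines:
--         if l.endswith(':') and l[:-1].lower() in states:
--             cur = l[:-1].lower()
--         owner.append(cur)
--
--     def norm(zone):
--         return zone.strip().lower().replace(' & ', '-').replace(' ', '-')
--
--     # build each state's dict independently from its owned entry lines
--     return {s: {norm(z): r.strip()
--                 for z, r in (l.split(':', 1)
--                              for l, o in zip(lines, owner)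
--                              if o == s and ':' in l and not l.endswith(':'))}
--             for s in states}
-- ===== Notes on version B (the rewrite author's own statement) =====
-- stated objective: alternative
-- what changed: A fills a nested dict in one stateful loop; B first scans once to label every line with its owning state, then builds each state's dict independently by filtering the labelled lines, so grouping is separated from value construction.
import Mathlib
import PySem

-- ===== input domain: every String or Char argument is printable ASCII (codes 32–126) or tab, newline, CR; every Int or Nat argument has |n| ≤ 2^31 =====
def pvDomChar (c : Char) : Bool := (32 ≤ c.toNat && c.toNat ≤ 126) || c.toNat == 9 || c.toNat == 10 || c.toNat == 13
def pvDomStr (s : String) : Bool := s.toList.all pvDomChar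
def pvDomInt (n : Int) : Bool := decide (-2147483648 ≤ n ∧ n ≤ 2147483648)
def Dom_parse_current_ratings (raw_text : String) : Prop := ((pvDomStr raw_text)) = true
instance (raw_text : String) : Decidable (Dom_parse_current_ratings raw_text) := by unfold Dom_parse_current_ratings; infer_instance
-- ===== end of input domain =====

-- B re-decomposes A's single stateful nested-dict loop into an ownership scan plus three
-- independent filtered dict builds (objective: alternative decomposition, same cost).

-- ===== PORT A =====
def pvNormA (zone : String) : String :=
  PySem.Str.replace (PySem.Str.replace (PySem.Str.lower (PySem.Str.strip zone)) " & " "-") " " "-"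

def pvACore (st : PySem.Dict String (PySem.Dict String String) × Option String) (line : String) :
    PySem.Dict String (PySem.Dict String String) × Option String :=
  if line = "" then st
  else if PySem.Str.endswith line ":" then
    let state_name := PySem.Str.lower (PySem.Str.slice line none (some (-1)))
    if st.1.contains state_name then (st.1, some state_name) else st
  else
    match st.2 with
    | none => st
    | some cur =>
      if PySem.Str.isIn ":" line then
        match PySem.Str.splitMax? line ":" 1 with
        | some (zone :: rating :: _) =>
            (st.1.modify cur PySem.Dict.empty
              (fun d => d.insert (pvNormA zone) (PySem.Str.strip rating)), st.2)
        | _ => st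
      else st

def pvAStep (st : PySem.Dict String (PySem.Dict String String) × Option String) (line0 : String) :
    PySem.Dict String (PySem.Dict String String) × Option String :=
  pvACore st (PySem.Str.strip line0)

def parse_current_ratings (raw_text : String) : List (String × List (String × String)) :=
  let ratings0 : PySem.Dict String (PySem.Dict String String) :=
    PySem.Dict.ofList [("colorado", PySem.Dict.empty), ("utah", PySem.Dict.empty),
                       ("california", PySem.Dict.empty)]
  let r := ((PySem.Str.split? (PySem.Str.strip raw_text) "\n").getD []).foldl pvAStep (ratings0, none)
  r.1.items.map (fun p => (p.1, p.2.items))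

-- ===== PORT B =====
def pvStates : List String := ["colorado", "utah", "california"]

def pvNameB (l : String) : String := PySem.Str.lower (PySem.Str.slice l none (some (-1)))

def pvOwnerUpd (cur : Option String) (l : String) : Option String :=
  if PySem.Str.endswith l ":" && pvStates.contains (pvNameB l) then some (pvNameB l) else cur

def pvOwners (lines : List String) : List (Option String) :=
  (lines.foldl (fun st l =>
      let cur := pvOwnerUpd st.1 l
      (cur, st.2 ++ [cur])) ((none : Option String), ([] : List (Option String)))).2

def pvNormB (zone : String) : String :=
  PySem.Str.replace (PySem.Str.replace (PySem.Str.lower (PySem.Str.strip zone)) " & " "-") " " "-"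

def pvInsStep (d : PySem.Dict String String) (p : String × Option String) : PySem.Dict String String :=
  match PySem.Str.splitMax? p.1 ":" 1 with
  | some (z :: r :: _) => d.insert (pvNormB z) (PySem.Str.strip r)
  | _ => d

def pvEntryCond (s : String) (p : String × Option String) : Bool :=
  p.2 == some s && PySem.Str.isIn ":" p.1 && !(PySem.Str.endswith p.1 ":")

def pvBuild (s : String) (lines : List String) (owner : List (Option String)) :
    PySem.Dict String String :=
  ((lines.zip owner).filter (pvEntryCond s)).foldl pvInsStep PySem.Dict.empty

def parse_current_ratings_alt (raw_text : String) : List (String × List (String × String)) :=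
  let lines := ((PySem.Str.split? (PySem.Str.strip raw_text) "\n").getD []).map PySem.Str.strip
  let owner := pvOwners lines
  pvStates.map (fun s => (s, (pvBuild s lines owner).items))

-- ===== PRECONDITION & SPEC =====
def Spec_parse_current_ratings (raw_text : String) (out : List (String × List (String × String))) : Prop := out = parse_current_ratings_alt raw_text
instance (raw_text : String) (out : List (String × List (String × String))) : Decidable (Spec_parse_current_ratings raw_text out) := by unfold Spec_parse_current_ratings; infer_instance

-- ===== CLAIM (what is proved, stated in full; the proofs are below) =====
def Claim_equal_parse_current_ratings : Prop := ∀ (raw_text : String), Dom_parse_current_ratings raw_text → Spec_parse_current_ratings raw_text (parse_current_ratings raw_text)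

-- ===== LEMMAS AND PROOFS =====

-- owners list, cons-recursive form
def pvOwnersFrom (cur : Option String) : List String → List (Option String)
  | [] => []
  | l :: ls => pvOwnerUpd cur l :: pvOwnersFrom (pvOwnerUpd cur l) ls

def pvEntries (s : String) (cur : Option String) (ls : List String) : List (String × Option String) :=
  (ls.zip (pvOwnersFrom cur ls)).filter (pvEntryCond s)

def pvR (dc du dca : PySem.Dict String String) : PySem.Dict String (PySem.Dict String String) :=
  PySem.Dict.ofList [("colorado", dc), ("utah", du), ("california", dca)]

lemma pvNorm_eq : pvNormA = pvNormB := rfl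

lemma pvR_eq (dc du dca : PySem.Dict String String) :
    pvR dc du dca = PySem.Dict.mk [("colorado", dc), ("utah", du), ("california", dca)] := rfl

lemma pvOwners_acc (ls : List String) : ∀ (c : Option String) (acc : List (Option String)),
    (ls.foldl (fun st l => let cur := pvOwnerUpd st.1 l; (cur, st.2 ++ [cur])) (c, acc)).2
      = acc ++ pvOwnersFrom c ls := by
  induction ls with
  | nil => intro c acc; simp [pvOwnersFrom]
  | cons l ls ih => intro c acc; simp [pvOwnersFrom, List.foldl, ih]

lemma pvOwners_eq (ls : List String) : pvOwners ls = pvOwnersFrom none ls := by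
  simpa [pvOwners] using pvOwners_acc ls none []

lemma pvR_contains (dc du dca : PySem.Dict String String) (n : String) :
    (pvR dc du dca).contains n = pvStates.contains n := by
  simp [pvR_eq, PySem.Dict.contains, pvStates, BEq.comm, beq_eq_decide]

lemma pvR_modify (dc du dca : PySem.Dict String String) (c : String)
    (f : PySem.Dict String String → PySem.Dict String String) (e : PySem.Dict String String)
    (hc : c ∈ pvStates) :
    (pvR dc du dca).modify c e f =
      pvR (if c = "colorado" then f dc else dc) (if c = "utah" then f du else du)
          (if c = "california" then f dca else dca) := by
  simp only [pvStates, List.mem_cons, List.not_mem_nil, or_false] at hc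
  rcases hc with rfl | rfl | rfl <;>
    simp [pvR_eq, PySem.Dict.modify, PySem.Dict.insert, PySem.Dict.contains,
          PySem.Dict.getD, PySem.Dict.get?]

lemma pvEntries_cons (s : String) (cur : Option String) (l : String) (ls : List String) :
    pvEntries s cur (l :: ls)
      = (if pvEntryCond s (l, pvOwnerUpd cur l) then [(l, pvOwnerUpd cur l)] else [])
          ++ pvEntries s (pvOwnerUpd cur l) ls := by
  simp only [pvEntries, pvOwnersFrom, List.zip_cons_cons, List.filter_cons]
  split <;> simp

lemma pvFoldl_if_cons {α β : Type} (f : α → β → α) (d : α) (x : β) (c : Bool) (t : List β) :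
    ((if c then [x] else []) ++ t).foldl f d = t.foldl f (if c then f d x else d) := by
  rcases c <;> simp

lemma pvAStep_strip (ls : List String) (st : PySem.Dict String (PySem.Dict String String) × Option String) :
    ls.foldl pvAStep st = (ls.map PySem.Str.strip).foldl pvACore st := by
  rw [List.foldl_map]; rfl

lemma pvMain (ls : List String) : ∀ (cur : Option String) (dc du dca : PySem.Dict String String),
    (cur = none ∨ ∃ c, cur = some c ∧ c ∈ pvStates) →
    ls.foldl pvACore (pvR dc du dca, cur)
      = (pvR ((pvEntries "colorado" cur ls).foldl pvInsStep dc)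
             ((pvEntries "utah" cur ls).foldl pvInsStep du)
             ((pvEntries "california" cur ls).foldl pvInsStep dca),
         ls.foldl pvOwnerUpd cur) := by
  induction ls with
  | nil => intro cur dc du dca _; simp [pvEntries, pvOwnersFrom]
  | cons l ls ih =>
    intro cur dc du dca hcur
    rw [List.foldl_cons, List.foldl_cons]
    simp only [pvEntries_cons, pvFoldl_if_cons]
    by_cases hH : PySem.Chars.endswith l.toList [':'] = true
    · -- header-shaped line (may or may not be recognized); never an entry
      have hE : ¬ l = "" := by
        intro h; subst h; exact absurd hH (by decide)
      by_cases hC : PySem.Str.lower (PySem.Str.slice l none (some (-1))) ∈ pvStates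
      · have hstep : pvACore (pvR dc du dca, cur) l
            = (pvR dc du dca, some (pvNameB l)) := by
          simp [pvACore, pvNameB, hE, hH, pvR_contains, hC]
        have hu : pvOwnerUpd cur l = some (pvNameB l) := by
          simp [pvOwnerUpd, pvNameB, hH, hC]
        have hcond : ∀ s, pvEntryCond s (l, some (pvNameB l)) = false := by
          intro s; simp [pvEntryCond, hH]
        rw [hstep, ih _ _ _ _ (Or.inr ⟨pvNameB l, rfl, by simpa [pvNameB] using hC⟩)]
        simp [hu, hcond]
      · have hstep : pvACore (pvR dc du dca, cur) l = (pvR dc du dca, cur) := by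
          simp [pvACore, hE, hH, pvR_contains, hC]
        have hu : pvOwnerUpd cur l = cur := by
          simp [pvOwnerUpd, pvNameB, hC]
        have hcond : ∀ s, pvEntryCond s (l, cur) = false := by
          intro s; simp [pvEntryCond, hH]
        rw [hstep, ih _ _ _ _ hcur]
        simp [hu, hcond]
    · -- not a header; owner unchanged
      rw [Bool.not_eq_true] at hH
      have hu : pvOwnerUpd cur l = cur := by simp [pvOwnerUpd, hH]
      rcases hcur with rfl | ⟨c, rfl, hc⟩
      · -- no active section: line is skipped by both
        have hstep : pvACore (pvR dc du dca, none) l = (pvR dc du dca, none) := by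
          by_cases hE : l = "" <;> simp [pvACore, hE, hH]
        have hcond : ∀ s, pvEntryCond s (l, (none : Option String)) = false := by
          intro s; simp [pvEntryCond]
        rw [hstep, ih _ _ _ _ (Or.inl rfl)]
        simp [hu, hcond]
      · by_cases hI : PySem.Chars.isIn [':'] l.toList = true
        · -- colon line inside section c: an entry (or a degenerate split, skipped by both)
          have hE : ¬ l = "" := by
            intro h; subst h; exact absurd hI (by decide)
          have hcond : ∀ s, pvEntryCond s (l, some c) = (c == s) := by
            intro s; simp [pvEntryCond, hI, hH]
          rcases hS : PySem.Str.splitMax? l ":" 1 with _ | ⟨_ | ⟨z, _ | ⟨r, parts⟩⟩⟩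
          · have hstep : pvACore (pvR dc du dca, some c) l = (pvR dc du dca, some c) := by
              simp [pvACore, hE, hH, hI, hS]
            rw [hstep, ih _ _ _ _ (Or.inr ⟨c, rfl, hc⟩)]
            simp [hu, hcond, pvInsStep, hS]
          · have hstep : pvACore (pvR dc du dca, some c) l = (pvR dc du dca, some c) := by
              simp [pvACore, hE, hH, hI, hS]
            rw [hstep, ih _ _ _ _ (Or.inr ⟨c, rfl, hc⟩)]
            simp [hu, hcond, pvInsStep, hS]
          · have hstep : pvACore (pvR dc du dca, some c) l = (pvR dc du dca, some c) := by
              simp [pvACore, hE, hH, hI, hS]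
            rw [hstep, ih _ _ _ _ (Or.inr ⟨c, rfl, hc⟩)]
            simp [hu, hcond, pvInsStep, hS]
          · -- the real insert
            have hins : ∀ d : PySem.Dict String String,
                pvInsStep d (l, some c)
                  = d.insert (pvNormB z) (PySem.Str.strip r) := by
              intro d; simp [pvInsStep, hS]
            have hstep : pvACore (pvR dc du dca, some c) l
                = (pvR (if c = "colorado" then dc.insert (pvNormB z) (PySem.Str.strip r) else dc)
                       (if c = "utah" then du.insert (pvNormB z) (PySem.Str.strip r) else du)
                       (if c = "california" then dca.insert (pvNormB z) (PySem.Str.strip r) else dca),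
                   some c) := by
              simp [pvACore, hE, hH, hI, hS, pvNorm_eq, pvR_modify _ _ _ _ _ _ hc]
            rw [hstep, ih _ _ _ _ (Or.inr ⟨c, rfl, hc⟩)]
            simp [hu, hcond, hins, beq_iff_eq]
        · -- no colon: skipped by both
          rw [Bool.not_eq_true] at hI
          have hstep : pvACore (pvR dc du dca, some c) l = (pvR dc du dca, some c) := by
            by_cases hE : l = "" <;> simp [pvACore, hE, hH, hI]
          have hcond : ∀ s, pvEntryCond s (l, some c) = false := by
            intro s; simp [pvEntryCond, hI]
          rw [hstep, ih _ _ _ _ (Or.inr ⟨c, rfl, hc⟩)]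
          simp [hu, hcond]

-- ===== VERDICT (by name: the statement is the Claim_ definition above) =====
theorem parse_current_ratings_spec : Claim_equal_parse_current_ratings := by
  intro raw _
  unfold Spec_parse_current_ratings
  simp only [parse_current_ratings, parse_current_ratings_alt]
  rw [show PySem.Dict.ofList [("colorado", (PySem.Dict.empty : PySem.Dict String String)),
        ("utah", PySem.Dict.empty), ("california", PySem.Dict.empty)]
      = pvR PySem.Dict.empty PySem.Dict.empty PySem.Dict.empty from rfl,
     pvAStep_strip, pvMain _ none _ _ _ (Or.inl rfl)]
  simp only [pvOwners_eq]
  simp [pvR_eq, pvStates, pvBuild, pvEntries]
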